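-- pv_equiv track=rewrite | github.com/ajpower/project-euler | p049.py | evenly_spaced
-- ===== SOURCE A (Python) =====
-- def evenly_spaced(my_list):
--     """Return a list of evenly spaced terms in 'my_list', provided there are at
--     least three such terms. 'my_list' is assumed to be sorted.
--     """
--     for i in range(len(my_list)):
--         for j in range(i+1, len(my_list)):
--             diff = my_list[j] - my_list[i]
--             if diff != 0:
--                 for k in range(j+1, len(my_list)):
--                     if my_list[k] - my_list[j] == diff:
--                         return [my_list[i], my_list[j], my_list[k]]
--     return []
-- ===== SOURCE B (Python) =====
-- def evenly_spaced(my_list):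
--     """Return a list of evenly spaced terms in 'my_list', provided there are at
--     least three such terms. 'my_list' is assumed to be sorted.
--     """
--     last = {}
--     for idx, v in enumerate(my_list):
--         last[v] = idx
--     n = len(my_list)
--     for i in range(n):
--         for j in range(i + 1, n):
--             diff = my_list[j] - my_list[i]
--             if diff != 0:
--                 k = last.get(my_list[j] + diff)
--                 if k is not None and k > j:
--                     return [my_list[i], my_list[j], my_list[j] + diff]
--     return []
-- ===== Notes on version B (the rewrite author's own statement) =====
-- stated objective: faster
-- what changed: Replaced the innermost linear scan for the third term by a precomputed hash map from value to its last index, so each pair (i,j) is checked in O(1).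
import Mathlib
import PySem

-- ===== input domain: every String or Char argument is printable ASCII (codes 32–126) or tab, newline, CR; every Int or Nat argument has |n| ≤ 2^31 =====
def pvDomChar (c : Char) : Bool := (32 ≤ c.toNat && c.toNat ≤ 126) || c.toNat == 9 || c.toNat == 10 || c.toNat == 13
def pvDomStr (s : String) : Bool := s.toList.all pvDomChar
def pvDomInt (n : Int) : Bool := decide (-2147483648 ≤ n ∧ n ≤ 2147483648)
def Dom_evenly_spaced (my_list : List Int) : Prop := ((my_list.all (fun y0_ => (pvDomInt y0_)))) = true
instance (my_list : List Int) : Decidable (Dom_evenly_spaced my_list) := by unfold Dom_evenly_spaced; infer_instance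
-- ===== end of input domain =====

-- B replaces A's innermost linear scan by a dict from value to its last index, built once
-- before the double loop (objective: faster; measured).

-- ===== PORT A =====
-- A's three nested 'for … in range' loops with early return, as recursions over the loop
-- index; the structurally decreasing 'fuel' argument (= list length at the top call) only
-- makes the recursion total and never runs out on an in-range index.
def esLoopK (m : List Int) (mi mj diff : Int) : Nat → Nat → Option (List Int)
  | 0, _ => none
  | fuel + 1, k =>
    if h : k < m.length then
      if m[k] - mj = diff then some [mi, mj, m[k]]
      else esLoopK m mi mj diff fuel (k + 1)
    else none

def esLoopJ (m : List Int) (mi : Int) : Nat → Nat → Option (List Int)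
  | 0, _ => none
  | fuel + 1, j =>
    if h : j < m.length then
      if m[j] - mi ≠ 0 then
        match esLoopK m mi m[j] (m[j] - mi) m.length (j + 1) with
        | some r => some r
        | none => esLoopJ m mi fuel (j + 1)
      else esLoopJ m mi fuel (j + 1)
    else none

def esLoopI (m : List Int) : Nat → Nat → Option (List Int)
  | 0, _ => none
  | fuel + 1, i =>
    if h : i < m.length then
      match esLoopJ m m[i] m.length (i + 1) with
      | some r => some r
      | none => esLoopI m fuel (i + 1)
    else none

def evenly_spaced (my_list : List Int) : List Int :=
  (esLoopI my_list my_list.length 0).getD []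

-- ===== PORT B =====
-- 'last[v] = idx' loop over enumerate(my_list)
def esLast (m : List Int) : PySem.Dict Int Int :=
  (PySem.List.enumerate m).foldl (fun d p => d.insert p.2 p.1) PySem.Dict.empty

def esAltJ (m : List Int) (last : PySem.Dict Int Int) (mi : Int) : Nat → Nat → Option (List Int)
  | 0, _ => none
  | fuel + 1, j =>
    if h : j < m.length then
      if m[j] - mi ≠ 0 then
        match last.get? (m[j] + (m[j] - mi)) with
        | some k =>
            if (j : Int) < k then some [mi, m[j], m[j] + (m[j] - mi)]
            else esAltJ m last mi fuel (j + 1)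
        | none => esAltJ m last mi fuel (j + 1)
      else esAltJ m last mi fuel (j + 1)
    else none

def esAltI (m : List Int) (last : PySem.Dict Int Int) : Nat → Nat → Option (List Int)
  | 0, _ => none
  | fuel + 1, i =>
    if h : i < m.length then
      match esAltJ m last m[i] m.length (i + 1) with
      | some r => some r
      | none => esAltI m last fuel (i + 1)
    else none

def evenly_spaced_alt (my_list : List Int) : List Int :=
  (esAltI my_list (esLast my_list) my_list.length 0).getD []

-- ===== PRECONDITION & SPEC =====
def Spec_evenly_spaced (my_list : List Int) (out : List Int) : Prop := out = evenly_spaced_alt my_list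
instance (my_list : List Int) (out : List Int) : Decidable (Spec_evenly_spaced my_list out) := by unfold Spec_evenly_spaced; infer_instance

-- ===== CLAIM (what is proved, stated in full; the proofs are below) =====
def Claim_equal_evenly_spaced : Prop := ∀ (my_list : List Int), Dom_evenly_spaced my_list → Spec_evenly_spaced my_list (evenly_spaced my_list)

-- ===== LEMMAS AND PROOFS =====

-- Building the dict: m ++ [a] inserts (a, len m) last.
theorem esLast_append (m : List Int) (a : Int) :
    esLast (m ++ [a]) = (esLast m).insert a (m.length : Int) := by
  unfold esLast
  rw [PySem.List.enumerate_append, List.foldl_append]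
  simp [PySem.List.enumerate_cons, PySem.List.enumerate_nil]

-- Soundness: a hit in the dict is an index of an occurrence of v in m.
theorem esLast_sound (m : List Int) (v k : Int) (h : (esLast m).get? v = some k) :
    ∃ kn : Nat, k = (kn : Int) ∧ kn < m.length ∧ m[kn]? = some v := by
  induction m using List.reverseRecOn with
  | nil =>
      exfalso
      simp [esLast, PySem.List.enumerate_nil, PySem.Dict.get?_empty] at h
  | append_singleton ms a ih =>
      rw [esLast_append, PySem.Dict.get?_insert] at h
      by_cases hv : v = a
      · rw [if_pos hv] at h
        refine ⟨ms.length, by simpa using h.symm, by simp, ?_⟩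
        rw [hv, List.getElem?_concat_length]
      · rw [if_neg hv] at h
        obtain ⟨kn, rfl, h2, h3⟩ := ih h
        exact ⟨kn, rfl, by simp; omega, by rw [List.getElem?_append_left h2]; exact h3⟩

-- Completeness: any occurrence of v is at an index ≤ the dict's stored index.
theorem esLast_complete (m : List Int) (v : Int) (kn : Nat)
    (h1 : kn < m.length) (h2 : m[kn]? = some v) :
    ∃ k, (esLast m).get? v = some k ∧ (kn : Int) ≤ k := by
  induction m using List.reverseRecOn with
  | nil => simp at h1
  | append_singleton ms a ih =>
      rw [esLast_append, PySem.Dict.get?_insert]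
      by_cases hv : v = a
      · refine ⟨(ms.length : Int), by rw [if_pos hv], ?_⟩
        simp at h1; omega
      · rw [if_neg hv]
        have hkn : kn ≠ ms.length := by
          intro he
          rw [he, List.getElem?_concat_length] at h2
          exact hv (by injection h2 with h2'; exact h2'.symm)
        have h1' : kn < ms.length := by simp at h1; omega
        exact ih h1' (by rw [List.getElem?_append_left h1'] at h2; exact h2)

-- A's innermost loop returns [mi, mj, mj + diff] iff some index ≥ k0 holds mj + diff,
-- and none otherwise (for enough fuel).
theorem esLoopK_char (m : List Int) (mi mj diff : Int) :
    ∀ fuel k0, m.length - k0 ≤ fuel →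
      (esLoopK m mi mj diff fuel k0 = some [mi, mj, mj + diff] ∧
        ∃ kn, k0 ≤ kn ∧ kn < m.length ∧ m[kn]? = some (mj + diff)) ∨
      (esLoopK m mi mj diff fuel k0 = none ∧
        ∀ kn, k0 ≤ kn → kn < m.length → m[kn]? ≠ some (mj + diff)) := by
  intro fuel
  induction fuel with
  | zero =>
      intro k0 h
      right
      exact ⟨rfl, by intro kn h1 h2 h3; omega⟩
  | succ n ih =>
      intro k0 h
      rw [esLoopK]
      by_cases hk : k0 < m.length
      · rw [dif_pos hk]
        by_cases hv : m[k0] - mj = diff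
        · left
          have hval : m[k0] = mj + diff := by omega
          rw [if_pos hv, hval]
          exact ⟨rfl, k0, le_refl _, hk, by rw [List.getElem?_eq_getElem hk, hval]⟩
        · rw [if_neg hv]
          rcases ih (k0 + 1) (by omega) with ⟨e, kn, h1, h2, h3⟩ | ⟨e, hn⟩
          · exact Or.inl ⟨e, kn, by omega, h2, h3⟩
          · right
            refine ⟨e, fun kn h1 h2 h3 => ?_⟩
            rcases Nat.eq_or_lt_of_le h1 with rfl | hlt
            · rw [List.getElem?_eq_getElem h2] at h3
              exact hv (by injection h3 with h3'; omega)
            · exact hn kn hlt h2 h3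
      · rw [dif_neg hk]
        exact Or.inr ⟨rfl, by intro kn h1 h2 h3; omega⟩

theorem esAltJ_eq (m : List Int) (mi : Int) :
    ∀ fuel j, esAltJ m (esLast m) mi fuel j = esLoopJ m mi fuel j := by
  intro fuel
  induction fuel with
  | zero => intro j; rfl
  | succ n ih =>
      intro j
      rw [esAltJ, esLoopJ]
      by_cases hj : j < m.length
      · rw [dif_pos hj, dif_pos hj]
        by_cases hd : m[j] - mi ≠ 0
        · rw [if_pos hd, if_pos hd]
          rcases hcase : (esLast m).get? (m[j] + (m[j] - mi)) with _ | k
          · -- dict miss: no occurrence anywhere, so A's inner loop finds nothing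
            have hnone : esLoopK m mi m[j] (m[j] - mi) m.length (j + 1) = none := by
              rcases esLoopK_char m mi m[j] (m[j] - mi) m.length (j + 1) (by omega) with
                ⟨_, kn, _, h2, h3⟩ | ⟨e, _⟩
              · obtain ⟨k', hk', _⟩ := esLast_complete m (m[j] + (m[j] - mi)) kn h2 h3
                rw [hcase] at hk'; cases hk'
              · exact e
            rw [hnone]
            exact ih (j + 1)
          · dsimp only
            by_cases hlt : (j : Int) < k
            · rw [if_pos hlt]
              obtain ⟨kn, rfl, h2, h3⟩ := esLast_sound m (m[j] + (m[j] - mi)) k hcase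
              have hsome : esLoopK m mi m[j] (m[j] - mi) m.length (j + 1) =
                  some [mi, m[j], m[j] + (m[j] - mi)] := by
                rcases esLoopK_char m mi m[j] (m[j] - mi) m.length (j + 1) (by omega) with
                  ⟨e, _⟩ | ⟨_, hn⟩
                · exact e
                · exact absurd h3 (hn kn (by omega) h2)
              rw [hsome]
            · rw [if_neg hlt]
              have hnone : esLoopK m mi m[j] (m[j] - mi) m.length (j + 1) = none := by
                rcases esLoopK_char m mi m[j] (m[j] - mi) m.length (j + 1) (by omega) with
                  ⟨_, kn, h1, h2, h3⟩ | ⟨e, _⟩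
                · obtain ⟨k', hk', hle⟩ := esLast_complete m (m[j] + (m[j] - mi)) kn h2 h3
                  rw [hcase] at hk'
                  injection hk' with hk'
                  exact absurd (by omega : (j : Int) < k) hlt
                · exact e
              rw [hnone]
              exact ih (j + 1)
        · rw [if_neg hd, if_neg hd]
          exact ih (j + 1)
      · rw [dif_neg hj, dif_neg hj]

theorem esAltI_eq (m : List Int) :
    ∀ fuel i, esAltI m (esLast m) fuel i = esLoopI m fuel i := by
  intro fuel
  induction fuel with
  | zero => intro i; rfl
  | succ n ih =>
      intro i
      rw [esAltI, esLoopI]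
      by_cases hi : i < m.length
      · rw [dif_pos hi, dif_pos hi, esAltJ_eq]
        rcases esLoopJ m m[i] m.length (i + 1) with _ | r
        · exact ih (i + 1)
        · rfl
      · rw [dif_neg hi, dif_neg hi]

-- ===== VERDICT (by name: the statement is the Claim_ definition above) =====
theorem evenly_spaced_spec : Claim_equal_evenly_spaced := by
  intro m _
  unfold Spec_evenly_spaced evenly_spaced evenly_spaced_alt
  rw [esAltI_eq]
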